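-- pv_equiv track=rewrite | github.com/eoin-og/Genetic-Algorithm- | GeneticAlgorithm.py | get_fittest
-- ===== SOURCE A (Python) =====
-- target = 'The quick brown fox jumped over the lazy dog, The quick brown fox jumped over the lazy dog'
--
-- def get_difference(s1, s2):
--    return sum(c1 != c2 for c1, c2 in zip(s1, s2))
--
-- def get_fittest(sample):
--     fittest = ''
--     min_v = 100
--     for test in sample:
--         if get_difference(test, target) < min_v:
--             fittest = test
--             min_v = get_difference(test, target)
--
--     second_fittest = ''
--     second_min_v = 100
--     for test in sample:
--         if get_difference(test, target) < second_min_v and test != fittest: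
--             second_fittest = test
--             second_min_v = get_difference(test, target)
--
--     return fittest, second_fittest
-- ===== SOURCE B (Python) =====
-- target = 'The quick brown fox jumped over the lazy dog, The quick brown fox jumped over the lazy dog'
--
-- def get_difference(s1, s2):
--    return sum(c1 != c2 for c1, c2 in zip(s1, s2))
--
-- def get_fittest(sample):
--     fittest, min_v = '', 100
--     second_fittest, second_min_v = '', 100
--     for test in sample:
--         d = get_difference(test, target)
--         if d < min_v:
--             second_fittest, second_min_v = fittest, min_v
--             fittest, min_v = test, d
--         elif test != fittest and d < second_min_v:
--             second_fittest, second_min_v = test, d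
--     return fittest, second_fittest
-- ===== Notes on version B (the rewrite author's own statement) =====
-- stated objective: alternative
-- what changed: Replaced A's two sequential min-scans (each calling get_difference twice per kept element) with a single pass that computes each distance once and maintains (fittest, second_fittest) together via a demote-on-improvement update.
import Mathlib
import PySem

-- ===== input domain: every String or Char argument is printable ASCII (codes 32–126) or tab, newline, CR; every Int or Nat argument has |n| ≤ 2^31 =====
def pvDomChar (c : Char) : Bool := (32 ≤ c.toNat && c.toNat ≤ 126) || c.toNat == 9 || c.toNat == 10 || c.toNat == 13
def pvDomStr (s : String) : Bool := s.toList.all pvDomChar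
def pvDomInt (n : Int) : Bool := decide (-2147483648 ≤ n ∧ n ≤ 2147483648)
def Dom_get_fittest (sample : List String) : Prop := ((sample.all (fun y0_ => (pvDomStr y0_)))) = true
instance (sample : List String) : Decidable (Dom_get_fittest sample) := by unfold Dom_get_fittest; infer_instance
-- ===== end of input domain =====

-- B replaces A's two min-scans by a single pass that computes each distance once and keeps (fittest, second) together via demotion.

-- ===== PORT A =====
def pvTarget : String :=
  "The quick brown fox jumped over the lazy dog, The quick brown fox jumped over the lazy dog"

def get_difference (s1 s2 : String) : Int :=
  (s1.toList.zip s2.toList).foldl (fun acc cc => acc + (if cc.1 != cc.2 then 1 else 0)) 0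

def pvStep1 (fm : String × Int) (test : String) : String × Int :=
  if get_difference test pvTarget < fm.2 then (test, get_difference test pvTarget) else fm

def pvStep2 (fittest : String) (sm : String × Int) (test : String) : String × Int :=
  if get_difference test pvTarget < sm.2 ∧ test ≠ fittest then (test, get_difference test pvTarget) else sm

def get_fittest (sample : List String) : String × String :=
  let fm := sample.foldl pvStep1 ("", 100)
  let sm := sample.foldl (pvStep2 fm.1) ("", 100)
  (fm.1, sm.1)

-- ===== PORT B =====
def pvStepB (st : (String × Int) × (String × Int)) (test : String) : (String × Int) × (String × Int) :=
  let d := get_difference test pvTarget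
  if d < st.1.2 then ((test, d), st.1)
  else if test ≠ st.1.1 ∧ d < st.2.2 then (st.1, (test, d))
  else st

def get_fittest_alt (sample : List String) : String × String :=
  let st := sample.foldl pvStepB (("", 100), ("", 100))
  (st.1.1, st.2.1)

-- ===== PRECONDITION & SPEC =====
def Spec_get_fittest (sample : List String) (out : String × String) : Prop := out = get_fittest_alt sample
instance (sample : List String) (out : String × String) : Decidable (Spec_get_fittest sample out) := by unfold Spec_get_fittest; infer_instance

-- ===== CLAIM (what is proved, stated in full; the proofs are below) =====
def Claim_equal_get_fittest : Prop := ∀ (sample : List String), Dom_get_fittest sample → Spec_get_fittest sample (get_fittest sample)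

-- ===== LEMMAS AND PROOFS =====

-- the running minimum of loop 1 never increases
theorem pvStep1_mono (l : List String) (s : String × Int) :
    (l.foldl pvStep1 s).2 ≤ s.2 := by
  induction l generalizing s with
  | nil => simp
  | cons x xs ih =>
    simp only [List.foldl_cons]
    refine le_trans (ih (pvStep1 s x)) ?_
    unfold pvStep1
    split
    · omega
    · exact le_refl _

-- the final running minimum is ≤ the distance of every scanned element
theorem pvStep1_le (l : List String) (s : String × Int) (x : String) (hx : x ∈ l) :
    (l.foldl pvStep1 s).2 ≤ get_difference x pvTarget := by
  induction l generalizing s with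
  | nil => simp at hx
  | cons y ys ih =>
    simp only [List.foldl_cons]
    rcases List.mem_cons.mp hx with h | h
    · subst h
      refine le_trans (pvStep1_mono ys (pvStep1 s x)) ?_
      unfold pvStep1
      split
      · exact le_refl _
      · omega
    · exact ih (pvStep1 s y) h

-- if the excluded string never occurs, loop 2 behaves like loop 1
theorem pvStep2_no_excl (l : List String) (e : String) (s : String × Int)
    (h : ∀ x ∈ l, x ≠ e) :
    l.foldl (pvStep2 e) s = l.foldl pvStep1 s := by
  induction l generalizing s with
  | nil => rfl
  | cons y ys ih =>
    simp only [List.foldl_cons]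
    have hy : y ≠ e := h y (List.mem_cons_self)
    have h2 : pvStep2 e s y = pvStep1 s y := by
      unfold pvStep2 pvStep1
      split
      · split
        · rfl
        · omega
      · split
        · rename_i h1 h2; exact absurd ⟨h2, hy⟩ h1
        · rfl
    rw [h2]
    exact ih (pvStep1 s y) (fun x hx => h x (List.mem_cons_of_mem _ hx))

-- main invariant: B's one-pass state equals (loop-1 state, loop-2 state w.r.t. loop-1's current fittest)
theorem pvInvariant (l : List String) :
    l.foldl pvStepB (("", 100), ("", 100)) =
      (l.foldl pvStep1 ("", 100),
       l.foldl (pvStep2 (l.foldl pvStep1 ("", 100)).1) ("", 100)) := by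
  induction l using List.reverseRecOn with
  | nil => rfl
  | append_singleton p t ih =>
    simp only [List.foldl_append, List.foldl_cons, List.foldl_nil]
    rw [ih]
    set F := p.foldl pvStep1 ("", 100) with hF
    set S := p.foldl (pvStep2 F.1) ("", 100) with hS
    by_cases h1 : get_difference t pvTarget < F.2
    · -- t becomes the new fittest; old fittest is demoted to second
      have hnot : ∀ x ∈ p, x ≠ t := by
        intro x hx he
        subst he
        have h := pvStep1_le p ("", 100) x hx
        rw [← hF] at h
        omega
      have hF' : pvStep1 F t = (t, get_difference t pvTarget) := by
        unfold pvStep1; rw [if_pos h1]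
      have hB : pvStepB (F, S) t = ((t, get_difference t pvTarget), F) := by
        unfold pvStepB; simp only []
        rw [if_pos h1]
      rw [hB, hF']
      have hS' : p.foldl (pvStep2 t) ("", 100) = F := by
        rw [pvStep2_no_excl p t ("", 100) hnot]
      have hstep : pvStep2 t (p.foldl (pvStep2 t) ("", 100)) t = F := by
        rw [hS']
        unfold pvStep2
        rw [if_neg (by intro h; exact h.2 rfl)]
      simp only [hstep]
    · -- fittest unchanged
      have hF' : pvStep1 F t = F := by
        unfold pvStep1; rw [if_neg h1]
      rw [hF']
      by_cases h2 : t ≠ F.1 ∧ get_difference t pvTarget < S.2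
      · have hB : pvStepB (F, S) t = (F, (t, get_difference t pvTarget)) := by
          unfold pvStepB; simp only []
          rw [if_neg h1, if_pos h2]
        rw [hB]
        have : pvStep2 F.1 S t = (t, get_difference t pvTarget) := by
          unfold pvStep2
          rw [if_pos ⟨h2.2, h2.1⟩]
        rw [← hS, this]
      · have hB : pvStepB (F, S) t = (F, S) := by
          unfold pvStepB; simp only []
          rw [if_neg h1, if_neg h2]
        rw [hB]
        have : pvStep2 F.1 S t = S := by
          unfold pvStep2
          rw [if_neg (by intro h; exact h2 ⟨h.2, h.1⟩)]
        rw [← hS, this]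

-- ===== VERDICT (by name: the statement is the Claim_ definition above) =====
theorem get_fittest_spec : Claim_equal_get_fittest := by
  intro sample _
  unfold Spec_get_fittest get_fittest get_fittest_alt
  rw [pvInvariant]
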